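-- pv_equiv track=rewrite | github.com/avielmoshe/Introduction-to-Computer-Science | python/week8.py | column_with_most
-- ===== SOURCE A (Python) =====
-- def column_with_most(matrix, number):
--     if not matrix:
--         return -1
--
--     max_cols = max(len(row) for row in matrix)
--     counts = [0] * max_cols
--
--     for col in range(max_cols):
--         for row in matrix:
--             if col < len(row) and row[col] == number:
--                 counts[col] += 1
--
--     if max(counts) == 0:
--         return -1
--
--     return counts.index(max(counts))
-- ===== SOURCE B (Python) =====
-- def column_with_most(matrix, number):
--     if not matrix:
--         return -1
--     js = sorted(j for row in matrix for j, x in enumerate(row) if x == number)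
--     best = -1
--     best_run = 0
--     run = 0
--     prev = -1
--     for j in js:
--         run = run + 1 if j == prev else 1
--         prev = j
--         if run > best_run:
--             best_run = run
--             best = j
--     return best
-- ===== Notes on version B (the rewrite author's own statement) =====
-- stated objective: alternative
-- what changed: Replaced A's dense per-column counting array (column-major re-scan of every row per column, then max and index passes) by collecting the column indices of all matches, sorting them, and scanning runs of equal indices once, tracking the first longest run.
import Mathlib
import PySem

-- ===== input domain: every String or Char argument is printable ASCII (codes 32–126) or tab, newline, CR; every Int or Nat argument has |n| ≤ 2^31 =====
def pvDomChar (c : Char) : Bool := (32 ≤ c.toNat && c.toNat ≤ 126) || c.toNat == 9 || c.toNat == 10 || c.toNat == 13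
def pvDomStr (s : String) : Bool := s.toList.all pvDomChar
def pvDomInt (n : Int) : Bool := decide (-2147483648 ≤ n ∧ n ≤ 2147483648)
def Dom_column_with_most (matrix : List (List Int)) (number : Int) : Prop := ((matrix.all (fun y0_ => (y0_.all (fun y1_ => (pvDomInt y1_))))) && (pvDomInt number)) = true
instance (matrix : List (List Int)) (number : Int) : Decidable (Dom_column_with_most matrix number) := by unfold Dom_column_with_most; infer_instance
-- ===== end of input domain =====

-- B replaces A's dense per-column counting array (column-major re-scan of the rows for every
-- column index) by a different algorithm: collect the column indices of all matches, sort them,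
-- and scan runs of equal indices once, keeping the first longest run (objective: alternative).

-- ===== PORT A =====
-- for col in range(max_cols): for row in matrix: if col < len(row) and row[col] == number: counts[col] += 1
-- col comes from range(0, max_cols), hence 0 ≤ col, so counts[col] += 1 is exact as .set col.toNat.
def column_with_most (matrix : List (List Int)) (number : Int) : Int :=
  if matrix = [] then -1
  else
    match PySem.List.max? (matrix.map (fun row => (row.length : Int))) (fun y => y) with
    | none => -1  -- unreachable: matrix ≠ []
    | some maxCols =>
      let counts : List Int :=
        (PySem.List.pyRange 0 maxCols 1).foldl (fun cs col =>
          matrix.foldl (fun cs row =>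
            if col < (row.length : Int) ∧ PySem.List.pyGet? row col = some number then
              cs.set col.toNat (cs.getD col.toNat 0 + 1)
            else cs) cs)
          (List.replicate maxCols.toNat 0)
      match PySem.List.max? counts (fun y => y) with
      | none => -1  -- Python raises ValueError here (max of []); excluded by Pre_
      | some m =>
        if m = 0 then -1
        else
          match PySem.List.index? counts m with
          | some i => (i : Int)
          | none => -1  -- unreachable: m ∈ counts

-- ===== PORT B =====
-- js = sorted(j for row in matrix for j, x in enumerate(row) if x == number)
def matchIdx (number : Int) (row : List Int) : List Int :=
  (PySem.List.enumerate row 0).filterMap (fun jx => if jx.2 = number then some jx.1 else none)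

-- loop body of Source B; state s = (best, best_run, run, prev)
def runStep (s : Int × Int × Int × Int) (j : Int) : Int × Int × Int × Int :=
  let run := if j = s.2.2.2 then s.2.2.1 + 1 else 1
  if run > s.2.1 then (j, run, run, j) else (s.1, s.2.1, run, j)

def column_with_most_alt (matrix : List (List Int)) (number : Int) : Int :=
  if matrix = [] then -1
  else
    let js := PySem.List.sorted (matrix.flatMap (matchIdx number)) (fun j => j) false
    (js.foldl runStep (-1, 0, 0, -1)).1

-- ===== PRECONDITION & SPEC =====
-- Pre_ excludes exactly the inputs where Python A raises ValueError (max() of an empty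
-- sequence): a non-empty matrix all of whose rows are empty.
def Pre_column_with_most (matrix : List (List Int)) (number : Int) : Prop :=
  matrix = [] ∨ ∃ row ∈ matrix, row ≠ []
instance (matrix : List (List Int)) (number : Int) : Decidable (Pre_column_with_most matrix number) := by
  unfold Pre_column_with_most; infer_instance

def pvWitness_column_with_most : List (List Int) × Int := ([[1, 2], [1]], 1)

def Spec_column_with_most (matrix : List (List Int)) (number : Int) (out : Int) : Prop := out = column_with_most_alt matrix number
instance (matrix : List (List Int)) (number : Int) (out : Int) : Decidable (Spec_column_with_most matrix number out) := by unfold Spec_column_with_most; infer_instance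

-- ===== CLAIM (what is proved, stated in full; the proofs are below) =====
def Claim_equal_column_with_most : Prop := ∀ (matrix : List (List Int)) (number : Int), Dom_column_with_most matrix number → Pre_column_with_most matrix number → Spec_column_with_most matrix number (column_with_most matrix number)


-- ===== LEMMAS AND PROOFS =====

-- number of rows whose j-th entry equals `number`
def colCnt (matrix : List (List Int)) (number : Int) (j : Nat) : Int :=
  ((matrix.countP (fun row => row[j]? == some number) : Nat) : Int)

-- maximal row length
def mWidth (matrix : List (List Int)) : Nat :=
  matrix.foldl (fun n r => max n r.length) 0

lemma colCnt_cons (r : List Int) (rs : List (List Int)) (number : Int) (j : Nat) :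
    colCnt (r :: rs) number j = (if r[j]? = some number then 1 else 0) + colCnt rs number j := by
  simp only [colCnt, List.countP_cons]
  by_cases h : r[j]? = some number
  · simp [h]; ring
  · simp [h]

lemma colCnt_nonneg (matrix : List (List Int)) (number : Int) (j : Nat) :
    0 ≤ colCnt matrix number j := by
  simp [colCnt]

lemma mWidth_init (rows : List (List Int)) (a : Nat) :
    rows.foldl (fun n r => max n r.length) a = max a (mWidth rows) := by
  induction rows generalizing a with
  | nil => simp [mWidth]
  | cons r rs ih =>
    simp only [List.foldl_cons, mWidth] at *
    rw [ih, ih (max 0 r.length)]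
    simp [max_assoc]

lemma mWidth_cons (r : List Int) (rs : List (List Int)) :
    mWidth (r :: rs) = max r.length (mWidth rs) := by
  simp only [mWidth, List.foldl_cons]
  rw [mWidth_init]
  simp [mWidth]

lemma length_le_mWidth (matrix : List (List Int)) (row : List Int) (h : row ∈ matrix) :
    row.length ≤ mWidth matrix := by
  induction matrix with
  | nil => simp at h
  | cons r rs ih =>
    rw [mWidth_cons]
    rcases List.mem_cons.mp h with h | h
    · subst h; exact le_max_left _ _
    · exact le_trans (ih h) (le_max_right _ _)

-- ===== A-side =====

lemma max?_lengths (matrix : List (List Int)) (h : matrix ≠ []) :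
    PySem.List.max? (matrix.map (fun row => (row.length : Int))) (fun y => y)
      = some ((mWidth matrix : Nat) : Int) := by
  obtain ⟨r, rs, rfl⟩ := List.exists_cons_of_ne_nil h
  simp only [List.map_cons, PySem.List.max?_id_cons]
  congr 1
  rw [mWidth_cons]
  have key : ∀ (l : List (List Int)) (a : Nat),
      (l.map (fun row => (row.length : Int))).foldl max ((a : Nat) : Int)
        = ((l.foldl (fun n r => max n r.length) a : Nat) : Int) := by
    intro l
    induction l with
    | nil => intro a; simp
    | cons x xs ih =>
      intro a
      simp only [List.map_cons, List.foldl_cons]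
      rw [show max ((a : Nat) : Int) ((x.length : Nat) : Int) = ((max a x.length : Nat) : Int) by
        simp [Nat.cast_max]]
      exact ih _
  rw [key rs r.length, mWidth_init]

lemma cond_iff (number : Int) (r : List Int) (k : Nat) :
    (((k : Nat) : Int) < ((r.length : Nat) : Int) ∧ PySem.List.pyGet? r ((k : Nat) : Int) = some number)
      ↔ r[k]? = some number := by
  rw [PySem.List.pyGet?_natCast]
  constructor
  · exact fun h => h.2
  · intro h
    refine ⟨?_, h⟩
    have := List.getElem?_eq_some_iff.mp h
    exact_mod_cast this.choose

lemma inner_fold (number : Int) (rows : List (List Int)) :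
    ∀ (cs : List Int) (k : Nat), k < cs.length →
    rows.foldl (fun cs row =>
      if (((k : Nat) : Int) < ((row.length : Nat) : Int) ∧ PySem.List.pyGet? row ((k : Nat) : Int) = some number) then
        cs.set (((k : Nat) : Int)).toNat (cs.getD (((k : Nat) : Int)).toNat 0 + 1)
      else cs) cs
    = cs.set k (cs.getD k 0 + colCnt rows number k) := by
  induction rows with
  | nil =>
    intro cs k hk
    simp only [List.foldl_nil, colCnt, List.countP_nil]
    rw [show ((0 : Nat) : Int) = 0 by rfl]
    simp [List.getD_eq_getElem?_getD, List.getElem?_eq_getElem hk, List.set_getElem_self]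
  | cons r rs ih =>
    intro cs k hk
    simp only [List.foldl_cons, Int.toNat_natCast]
    simp only [Int.toNat_natCast] at ih
    rw [colCnt_cons]
    by_cases h : r[k]? = some number
    · rw [if_pos ((cond_iff number r k).mpr h)]
      rw [ih _ k (by simpa using hk)]
      rw [List.set_set]
      congr 1
      rw [List.getD_eq_getElem?_getD, List.getElem?_set_self hk]
      simp [List.getD_eq_getElem?_getD, h]
      ring
    · rw [if_neg (fun hc => h ((cond_iff number r k).mp hc))]
      rw [ih _ k hk, if_neg h]
      ring_nf

lemma outer_fold (matrix : List (List Int)) (number : Int) :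
    ∀ (k : Nat), k ≤ mWidth matrix →
    (PySem.List.pyRange 0 (k : Int) 1).foldl (fun cs col =>
        matrix.foldl (fun cs row =>
          if col < (row.length : Int) ∧ PySem.List.pyGet? row col = some number then
            cs.set col.toNat (cs.getD col.toNat 0 + 1)
          else cs) cs)
      (List.replicate (mWidth matrix) 0)
    = (List.range (mWidth matrix)).map (fun j => if j < k then colCnt matrix number j else 0) := by
  intro k
  induction k with
  | zero =>
    intro _
    rw [PySem.List.pyRange_one_eq_nil (by simp)]
    simp
  | succ k ih =>
    intro hk
    rw [show (((k + 1 : Nat)) : Int) = (k : Int) + 1 by push_cast; ring]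
    rw [PySem.List.pyRange_one_succ_right (by positivity)]
    rw [List.foldl_append, ih (by omega)]
    simp only [List.foldl_cons, List.foldl_nil]
    rw [inner_fold number matrix _ k (by simp; omega)]
    have hgd : (List.getD ((List.range (mWidth matrix)).map fun j => if j < k then colCnt matrix number j else 0) k 0) = 0 := by
      rw [List.getD_eq_getElem?_getD]
      rw [List.getElem?_map]
      rw [List.getElem?_range (by omega)]
      simp
    rw [hgd]
    apply List.ext_getElem
    · simp
    · intro i h1 h2
      rw [List.getElem_set]
      simp only [List.getElem_map, List.getElem_range]
      simp only [List.length_set, List.length_map, List.length_range] at h1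
      by_cases hik : k = i
      · rw [if_pos hik, if_pos (by omega)]; rw [← hik]; simp
      · rw [if_neg hik]
        by_cases h3 : i < k
        · rw [if_pos h3, if_pos (by omega)]
        · rw [if_neg h3, if_neg (by omega)]

-- ===== B-side =====

-- count of v among the match indices of one row (enumerate started at s)
lemma count_enumFM (number : Int) (row : List Int) :
    ∀ (s v : Int),
      (((PySem.List.enumerate row s).filterMap
          (fun jx => if jx.2 = number then some jx.1 else none)).count v)
        = if s ≤ v ∧ row[(v - s).toNat]? = some number then 1 else 0 := by
  induction row with
  | nil => intro s v; simp [PySem.List.enumerate_nil]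
  | cons x xs ih =>
    intro s v
    rw [PySem.List.enumerate_cons, List.filterMap_cons]
    have hshift : s < v → (v - s).toNat = (v - (s+1)).toNat + 1 := by omega
    by_cases hx : x = number
    · simp only [if_pos hx]
      rw [List.count_cons, ih (s+1) v]
      simp only [beq_iff_eq]
      rcases lt_trichotomy v s with hvs | hvs | hvs
      · rw [if_neg (show ¬ s = v by omega),
            if_neg (show ¬(s+1 ≤ v ∧ xs[(v - (s+1)).toNat]? = some number) by rintro ⟨h,_⟩; omega),
            if_neg (show ¬(s ≤ v ∧ (x::xs)[(v - s).toNat]? = some number) by rintro ⟨h,_⟩; omega)]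
      · subst hvs
        rw [if_neg (show ¬(v+1 ≤ v ∧ xs[(v - (v+1)).toNat]? = some number) by rintro ⟨h,_⟩; omega),
            if_pos rfl, if_pos ⟨le_refl _, by simp [hx]⟩]
      · rw [if_neg (show ¬ s = v by omega), hshift hvs, List.getElem?_cons_succ,
            if_congr (show (s+1 ≤ v ∧ xs[(v - (s+1)).toNat]? = some number)
              ↔ (s ≤ v ∧ xs[(v - (s+1)).toNat]? = some number) by
              constructor <;> (rintro ⟨h1,h2⟩; exact ⟨by omega, h2⟩)) rfl rfl]
        omega
    · simp only [if_neg hx]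
      rw [ih (s+1) v]
      rcases lt_trichotomy v s with hvs | hvs | hvs
      · rw [if_neg (show ¬(s+1 ≤ v ∧ xs[(v - (s+1)).toNat]? = some number) by rintro ⟨h,_⟩; omega),
            if_neg (show ¬(s ≤ v ∧ (x::xs)[(v - s).toNat]? = some number) by rintro ⟨h,_⟩; omega)]
      · subst hvs
        rw [if_neg (show ¬(v+1 ≤ v ∧ xs[(v - (v+1)).toNat]? = some number) by rintro ⟨h,_⟩; omega),
            if_neg (by rintro ⟨_,h2⟩; rw [show (v-v).toNat = 0 by omega] at h2; simp at h2; exact hx h2)]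
      · rw [hshift hvs, List.getElem?_cons_succ]
        exact if_congr (by constructor <;> (rintro ⟨h1,h2⟩; exact ⟨by omega, h2⟩)) rfl rfl

-- count of v among all match indices of the matrix
lemma count_flat (matrix : List (List Int)) (number : Int) (v : Int) :
    (((matrix.flatMap (matchIdx number)).count v : Nat) : Int)
      = if 0 ≤ v then colCnt matrix number v.toNat else 0 := by
  induction matrix with
  | nil => simp [colCnt]
  | cons r rs ih =>
    rw [List.flatMap_cons, List.count_append]
    push_cast
    rw [ih]
    unfold matchIdx
    rw [count_enumFM number r 0 v]
    rw [colCnt_cons]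
    by_cases hv : 0 ≤ v
    · rw [if_pos hv, if_pos hv]
      rw [if_congr (show (0 ≤ v ∧ r[(v - 0).toNat]? = some number) ↔ r[v.toNat]? = some number by
        constructor
        · rintro ⟨_, h⟩; rwa [show (v - 0).toNat = v.toNat by omega] at h
        · intro h; exact ⟨hv, by rwa [show (v - 0).toNat = v.toNat by omega]⟩) rfl rfl]
      split_ifs <;> push_cast <;> ring
    · rw [if_neg hv, if_neg hv, if_neg (by rintro ⟨h,_⟩; omega)]
      simp

-- every collected index is a valid column
lemma mem_flat_bounds (matrix : List (List Int)) (number : Int) (v : Int)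
    (h : v ∈ matrix.flatMap (matchIdx number)) :
    0 ≤ v ∧ v.toNat < mWidth matrix := by
  have hc : 0 < (matrix.flatMap (matchIdx number)).count v := List.count_pos_iff.mpr h
  have hcf := count_flat matrix number v
  by_cases hv : 0 ≤ v
  · rw [if_pos hv] at hcf
    refine ⟨hv, ?_⟩
    have hpos : 0 < colCnt matrix number v.toNat := by omega
    simp only [colCnt, Int.natCast_pos] at hpos
    obtain ⟨row, hrow, hp⟩ := List.countP_pos_iff.mp hpos
    simp only [beq_iff_eq] at hp
    have hj : v.toNat < row.length := (List.getElem?_eq_some_iff.mp hp).choose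
    exact lt_of_lt_of_le hj (length_le_mWidth matrix row hrow)
  · rw [if_neg hv] at hcf
    omega

-- effective remaining count of value v: occurrences still ahead plus the current run if it is v's
def ecnt (l : List Int) (run prev v : Int) : Int :=
  (l.count v : Int) + (if v = prev then run else 0)

def goodB (l : List Int) (bestRun run prev : Int) (v : Int) : Bool :=
  decide (bestRun < ecnt l run prev v ∧ ∀ w ∈ l, ecnt l run prev w ≤ ecnt l run prev v)

-- declarative result of B's scan loop from a given state
def bestSpec (l : List Int) (best bestRun run prev : Int) : Int :=
  ((l.filter (goodB l bestRun run prev)).head?).getD best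

lemma goodB_iff (l : List Int) (bR run prev v : Int) :
    goodB l bR run prev v = true
      ↔ (bR < ecnt l run prev v ∧ ∀ w ∈ l, ecnt l run prev w ≤ ecnt l run prev v) := by
  simp [goodB]

lemma bestSpec_cons (j : Int) (rest : List Int) (best bestRun run prev : Int)
    (hsrest : rest.Pairwise (· ≤ ·)) (hjle : ∀ w ∈ rest, j ≤ w) (hpj : prev ≤ j)
    (hr0 : 0 ≤ run) (hrb : run ≤ bestRun) :
    bestSpec (j :: rest) best bestRun run prev =
      if bestRun < (if j = prev then run + 1 else 1)
      then bestSpec rest j (if j = prev then run + 1 else 1) (if j = prev then run + 1 else 1) j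
      else bestSpec rest best bestRun (if j = prev then run + 1 else 1) j := by
  set r' := if j = prev then run + 1 else 1 with hr'
  have hr'1 : 1 ≤ r' := by rw [hr']; split_ifs <;> omega
  have hr'b : r' ≤ run + 1 := by rw [hr']; split_ifs <;> omega
  -- transfer of effective counts across the step
  have hE : ∀ v ∈ j :: rest, ecnt (j :: rest) run prev v = ecnt rest r' j v := by
    intro v hv
    by_cases hvj : v = j
    · subst hvj
      simp only [ecnt, List.count_cons, beq_self_eq_true, if_true, if_pos rfl]
      push_cast
      rw [hr']; split_ifs <;> omega
    · have hvr : v ∈ rest := by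
        rcases List.mem_cons.mp hv with h | h
        · exact absurd h hvj
        · exact h
      have hjv : j ≤ v := hjle v hvr
      have hvp : ¬ v = prev := fun h => hvj (by omega)
      have hbeq : (j == v) = false := beq_eq_false_iff_ne.mpr (fun h => hvj h.symm)
      simp only [ecnt, List.count_cons, hbeq, if_neg hvp, if_neg hvj]
      simp
  have hEj : ecnt (j :: rest) run prev j = ecnt rest r' j j := hE j List.mem_cons_self
  have he1j : ecnt rest r' j j = (rest.count j : Int) + r' := by simp [ecnt]
  have hcnn : (0:Int) ≤ (rest.count j : Int) := by positivity
  have hMj_ge : r' ≤ ecnt rest r' j j := by rw [he1j]; omega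
  have head_eq : j ∈ rest → ∃ t, rest = j :: t := by
    intro hjr
    cases rest with
    | nil => cases hjr
    | cons a t =>
      have h1 : j ≤ a := hjle a List.mem_cons_self
      have h2 : a ≤ j := by
        rcases List.mem_cons.mp hjr with h | h
        · omega
        · exact List.rel_of_pairwise_cons hsrest h
      exact ⟨t, by rw [show a = j by omega]⟩
  by_cases hup : bestRun < r'
  · rw [if_pos hup]
    by_cases hmax : ∀ w ∈ rest, ecnt rest r' j w ≤ ecnt rest r' j j
    · -- j is a global argmax: both sides evaluate to j
      have hg0j : goodB (j :: rest) bestRun run prev j = true := by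
        rw [goodB_iff]
        refine ⟨by rw [hEj]; omega, ?_⟩
        intro w hw
        rcases List.mem_cons.mp hw with h | h
        · subst h; exact le_refl _
        · rw [hE w (List.mem_cons_of_mem _ h), hEj]; exact hmax w h
      have hL : bestSpec (j :: rest) best bestRun run prev = j := by
        unfold bestSpec
        rw [List.filter_cons, if_pos hg0j]
        rfl
      rw [hL]
      by_cases hjr : j ∈ rest
      · obtain ⟨t, ht⟩ := head_eq hjr
        have hg1j : goodB rest r' r' j j = true := by
          rw [goodB_iff]
          have hc1 : (1:Int) ≤ (rest.count j : Int) := by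
            exact_mod_cast List.count_pos_iff.mpr hjr
          exact ⟨by rw [he1j]; omega, hmax⟩
        rw [ht] at hg1j ⊢
        unfold bestSpec
        rw [List.filter_cons, if_pos hg1j]
        rfl
      · have hcnt0 : rest.count j = 0 := List.count_eq_zero.mpr hjr
        have hfil : rest.filter (goodB rest r' r' j) = [] := by
          rw [List.filter_eq_nil_iff]
          intro w hw hgw
          obtain ⟨h1, h2⟩ := (goodB_iff _ _ _ _ _).mp hgw
          have h4 := hmax w hw
          rw [he1j, hcnt0] at h4
          push_cast at h4
          omega
        unfold bestSpec
        rw [hfil]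
        rfl
    · -- some later value beats j: j never wins, both sides filter the tail identically
      push_neg at hmax
      obtain ⟨w, hw, hww⟩ := hmax
      have hg0j : goodB (j :: rest) bestRun run prev j = false := by
        rw [Bool.eq_false_iff]
        intro hgt
        obtain ⟨-, hall⟩ := (goodB_iff _ _ _ _ _).mp hgt
        have h5 := hall w (List.mem_cons_of_mem _ hw)
        rw [hE w (List.mem_cons_of_mem _ hw), hEj] at h5
        omega
      have hcong : ∀ v ∈ rest, goodB (j :: rest) bestRun run prev v = goodB rest r' r' j v := by
        intro v hv
        simp only [goodB]
        rw [decide_eq_decide]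
        have hv1 := hE v (List.mem_cons_of_mem _ hv)
        constructor
        · rintro ⟨h1, h2⟩
          have hwle := h2 w (List.mem_cons_of_mem _ hw)
          rw [hE w (List.mem_cons_of_mem _ hw), hv1] at hwle
          refine ⟨by omega, ?_⟩
          intro u hu
          have h6 := h2 u (List.mem_cons_of_mem _ hu)
          rw [hE u (List.mem_cons_of_mem _ hu), hv1] at h6
          exact h6
        · rintro ⟨h1, h2⟩
          have hwv := h2 w hw
          refine ⟨by omega, ?_⟩
          intro u hu
          rcases List.mem_cons.mp hu with h | h
          · subst h; rw [hEj, hv1]; omega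
          · rw [hE u (List.mem_cons_of_mem _ h), hv1]; exact h2 u h
      unfold bestSpec
      rw [List.filter_cons, if_neg (by simp [hg0j]), List.filter_congr hcong]
      cases hmx : PySem.List.max? rest (fun v => ecnt rest r' j v) with
      | none => exact absurd ((PySem.List.max?_eq_none_iff _ _).mp hmx) (List.ne_nil_of_mem hw)
      | some vstar =>
        have hvm : vstar ∈ rest := PySem.List.max?_mem hmx
        have hvmax : ∀ y ∈ rest, ecnt rest r' j y ≤ ecnt rest r' j vstar :=
          PySem.List.max?_isMax hmx
        have hgv : goodB rest r' r' j vstar = true := by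
          rw [goodB_iff]
          have h5 := hvmax w hw
          exact ⟨by omega, hvmax⟩
        have hmemf : vstar ∈ rest.filter (goodB rest r' r' j) :=
          List.mem_filter.mpr ⟨hvm, hgv⟩
        cases hf : rest.filter (goodB rest r' r' j) with
        | nil => rw [hf] at hmemf; cases hmemf
        | cons h t => rfl
  · rw [if_neg hup]
    by_cases hg0j : goodB (j :: rest) bestRun run prev j = true
    · obtain ⟨h1, h2⟩ := (goodB_iff _ _ _ _ _).mp hg0j
      have h1' : bestRun < ecnt rest r' j j := by rwa [hEj] at h1
      have hjr : j ∈ rest := by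
        by_contra hjr
        have hcnt0 : rest.count j = 0 := List.count_eq_zero.mpr hjr
        rw [he1j, hcnt0] at h1'
        push_cast at h1'
        omega
      obtain ⟨t, ht⟩ := head_eq hjr
      have hg1j : goodB rest bestRun r' j j = true := by
        rw [goodB_iff]
        refine ⟨h1', ?_⟩
        intro u hu
        have h6 := h2 u (List.mem_cons_of_mem _ hu)
        rw [hE u (List.mem_cons_of_mem _ hu), hEj] at h6
        exact h6
      have hL : bestSpec (j :: rest) best bestRun run prev = j := by
        unfold bestSpec
        rw [List.filter_cons, if_pos hg0j]
        rfl
      have hR : bestSpec rest best bestRun r' j = j := by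
        unfold bestSpec
        rw [ht] at hg1j ⊢
        rw [List.filter_cons, if_pos hg1j]
        rfl
      rw [hL, hR]
    · have hg0j' : goodB (j :: rest) bestRun run prev j = false := by
        rw [Bool.eq_false_iff]; exact hg0j
      have hnj : ¬ (bestRun < ecnt (j :: rest) run prev j ∧
          ∀ w ∈ j :: rest, ecnt (j :: rest) run prev w ≤ ecnt (j :: rest) run prev j) :=
        fun hc => hg0j ((goodB_iff _ _ _ _ _).mpr hc)
      have hcong : ∀ v ∈ rest, goodB (j :: rest) bestRun run prev v = goodB rest bestRun r' j v := by
        intro v hv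
        simp only [goodB]
        rw [decide_eq_decide]
        have hv1 := hE v (List.mem_cons_of_mem _ hv)
        constructor
        · rintro ⟨h1, h2⟩
          refine ⟨by omega, ?_⟩
          intro u hu
          have h6 := h2 u (List.mem_cons_of_mem _ hu)
          rw [hE u (List.mem_cons_of_mem _ hu), hv1] at h6
          exact h6
        · rintro ⟨h1, h2⟩
          refine ⟨by omega, ?_⟩
          have hjle_v : ecnt (j :: rest) run prev j ≤ ecnt (j :: rest) run prev v := by
            by_cases hbj : bestRun < ecnt (j :: rest) run prev j
            · have hnall : ¬ ∀ w ∈ j :: rest, ecnt (j :: rest) run prev w ≤ ecnt (j :: rest) run prev j :=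
                fun hall => hnj ⟨hbj, hall⟩
              push_neg at hnall
              obtain ⟨u, hu, huu⟩ := hnall
              have hune : u ≠ j := fun h => by subst h; exact absurd huu (lt_irrefl _)
              have hur : u ∈ rest := by
                rcases List.mem_cons.mp hu with h | h
                · exact absurd h hune
                · exact h
              have h7 := h2 u hur
              have heu := hE u (List.mem_cons_of_mem _ hur)
              omega
            · omega
          intro u hu
          rcases List.mem_cons.mp hu with h | h
          · subst h; exact hjle_v
          · rw [hE u (List.mem_cons_of_mem _ h), hv1]; exact h2 u h
      unfold bestSpec
      rw [List.filter_cons, if_neg (by simp [hg0j']), List.filter_congr hcong]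

lemma runFold (l : List Int) :
    ∀ (best bestRun run prev : Int),
      l.Pairwise (· ≤ ·) → (∀ v ∈ l, prev ≤ v) → 0 ≤ run → run ≤ bestRun →
      (l.foldl runStep (best, bestRun, run, prev)).1 = bestSpec l best bestRun run prev := by
  induction l with
  | nil => intros; simp [bestSpec]
  | cons j rest ih =>
    intro best bestRun run prev hs hp hr0 hrb
    have hsrest : rest.Pairwise (· ≤ ·) := (List.pairwise_cons.mp hs).2
    have hjle : ∀ w ∈ rest, j ≤ w := (List.pairwise_cons.mp hs).1
    have hpj : prev ≤ j := hp j List.mem_cons_self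
    rw [List.foldl_cons]
    have hstep : runStep (best, bestRun, run, prev) j =
        if bestRun < (if j = prev then run + 1 else 1)
        then (j, (if j = prev then run + 1 else 1), (if j = prev then run + 1 else 1), j)
        else (best, bestRun, (if j = prev then run + 1 else 1), j) := by
      simp only [runStep]
    rw [hstep, bestSpec_cons j rest best bestRun run prev hsrest hjle hpj hr0 hrb]
    set r' := if j = prev then run + 1 else 1 with hr'
    have hr0' : 0 ≤ r' := by rw [hr']; split_ifs <;> omega
    by_cases hup : bestRun < r'
    · rw [if_pos hup, if_pos hup]
      exact ih j r' r' j hsrest hjle hr0' le_rfl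
    · rw [if_neg hup, if_neg hup]
      exact ih best bestRun r' j hsrest hjle hr0' (by omega)

-- ===== VERDICT (by name: the statement is the Claim_ definition above) =====
theorem column_with_most_spec : Claim_equal_column_with_most := by
  unfold Claim_equal_column_with_most Spec_column_with_most
  intro matrix number _ hpre
  by_cases hnil : matrix = []
  · simp [column_with_most, column_with_most_alt, hnil]
  · obtain ⟨r, hr, hrne⟩ : ∃ row ∈ matrix, row ≠ [] := hpre.resolve_left hnil
    unfold column_with_most column_with_most_alt
    rw [if_neg hnil, if_neg hnil]
    rw [max?_lengths matrix hnil]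
    have hW : 1 ≤ mWidth matrix := by
      have h1 : 1 ≤ r.length := by
        cases r with
        | nil => exact absurd rfl hrne
        | cons a t => simp
      exact le_trans h1 (length_le_mWidth matrix r hr)
    have hcA : (PySem.List.pyRange 0 ((mWidth matrix : Nat) : Int) 1).foldl (fun cs col =>
        matrix.foldl (fun cs row =>
          if col < (row.length : Int) ∧ PySem.List.pyGet? row col = some number then
            cs.set col.toNat (cs.getD col.toNat 0 + 1)
          else cs) cs)
        (List.replicate (((mWidth matrix : Nat) : Int)).toNat 0)
        = (List.range (mWidth matrix)).map (fun j => colCnt matrix number j) := by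
      rw [Int.toNat_natCast]
      rw [outer_fold matrix number (mWidth matrix) (le_refl _)]
      apply List.map_congr_left
      intro j hj
      rw [if_pos (List.mem_range.mp hj)]
    simp only [hcA]
    -- B side: js is the sorted list of match indices
    set L := matrix.flatMap (matchIdx number) with hL
    set js := PySem.List.sorted L (fun j => j) false with hjs
    have hperm : js.Perm L := PySem.List.sorted_perm L (fun j => j) false
    have hmemL : ∀ v ∈ js, 0 ≤ v ∧ v.toNat < mWidth matrix := fun v hv =>
      mem_flat_bounds matrix number v (hperm.mem_iff.mp hv)
    have hpw : js.Pairwise (· ≤ ·) := by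
      simpa using PySem.List.sorted_pairwise L (fun j => j)
    have hcjs : ∀ v : Int, ((js.count v : Nat) : Int)
        = if 0 ≤ v then colCnt matrix number v.toNat else 0 := by
      intro v
      rw [hperm.count_eq]
      exact count_flat matrix number v
    rw [runFold js (-1) 0 0 (-1) hpw (fun v hv => by have := (hmemL v hv).1; omega)
      le_rfl le_rfl]
    have hecnt : ∀ v : Int, ecnt js 0 (-1) v = ((js.count v : Nat) : Int) := by
      intro v
      simp only [ecnt]
      split_ifs <;> ring
    -- the dense count list
    set counts := (List.range (mWidth matrix)).map (fun j => colCnt matrix number j) with hcounts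
    have hcnts_mem : ∀ v ∈ js, colCnt matrix number v.toNat ∈ counts := by
      intro v hv
      exact List.mem_map_of_mem (List.mem_range.mpr (hmemL v hv).2)
    cases hmax : PySem.List.max? counts (fun y => y) with
    | none =>
      exfalso
      have : counts = [] := (PySem.List.max?_eq_none_iff _ _).mp hmax
      rw [hcounts] at this
      simp at this
      omega
    | some m =>
      have hm_mem : m ∈ counts := PySem.List.max?_mem hmax
      have hm_max : ∀ y ∈ counts, y ≤ m := PySem.List.max?_isMax hmax
      have hm_nonneg : 0 ≤ m := by
        obtain ⟨j0, -, hj0⟩ := List.mem_map.mp hm_mem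
        rw [← hj0]
        exact colCnt_nonneg matrix number j0
      by_cases hm : m = 0
      · -- no matches anywhere: js is empty, both sides -1
        have hjsnil : js = [] := by
          rw [List.eq_nil_iff_forall_not_mem]
          intro v hv
          have h1 : 0 < js.count v := List.count_pos_iff.mpr hv
          have h2 := hcjs v
          rw [if_pos (hmemL v hv).1] at h2
          have h3 := hm_max _ (hcnts_mem v hv)
          omega
        rw [hjsnil]
        simp [bestSpec, hm]
      · have hm_pos : 0 < m := lt_of_le_of_ne hm_nonneg (Ne.symm hm)
        -- first index attaining the maximum
        have hidx : (PySem.List.index? counts m).isSome := (PySem.List.index?_isSome_iff _ _).mpr hm_mem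
        obtain ⟨i, hieq⟩ := Option.isSome_iff_exists.mp hidx
        obtain ⟨hk, hvi, hmin⟩ := PySem.List.getElem_of_index?_eq_some hieq
        have hkW : i < mWidth matrix := by
          have := hk
          simpa [hcounts] using this
        have hci : colCnt matrix number i = m := by
          rw [← hvi]
          simp [hcounts]
        -- i is in js
        have hcnt_i : ((js.count ((i : Nat) : Int) : Nat) : Int) = m := by
          rw [hcjs]
          rw [if_pos (by positivity)]
          simpa using hci
        have himem : ((i : Nat) : Int) ∈ js := by
          rw [← List.count_pos_iff]
          omega
        -- every member's count is at most m
        have hub : ∀ w ∈ js, ((js.count w : Nat) : Int) ≤ m := by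
          intro w hw
          rw [hcjs, if_pos (hmemL w hw).1]
          exact hm_max _ (hcnts_mem w hw)
        have hq_i : goodB js 0 0 (-1) ((i : Nat) : Int) = true := by
          rw [goodB_iff]
          constructor
          · rw [hecnt, hcnt_i]; omega
          · intro w hw
            rw [hecnt, hecnt, hcnt_i]
            exact hub w hw
        have hif : ((i : Nat) : Int) ∈ js.filter (goodB js 0 0 (-1)) :=
          List.mem_filter.mpr ⟨himem, hq_i⟩
        unfold bestSpec
        cases hf : js.filter (goodB js 0 0 (-1)) with
        | nil => rw [hf] at hif; cases hif
        | cons h t =>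
          rw [hf] at hif
          have hhmem : h ∈ js.filter (goodB js 0 0 (-1)) := by rw [hf]; exact List.mem_cons_self
          obtain ⟨hhjs, hhq⟩ := List.mem_filter.mp hhmem
          obtain ⟨-, hhall⟩ := (goodB_iff _ _ _ _ _).mp hhq
          have hge : m ≤ ((js.count h : Nat) : Int) := by
            have := hhall _ himem
            rw [hecnt, hecnt, hcnt_i] at this
            exact this
          have hle := hub h hhjs
          have hch : colCnt matrix number h.toNat = m := by
            have h2 := hcjs h
            rw [if_pos (hmemL h hhjs).1] at h2
            omega
          -- minimality of i gives i ≤ h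
          have hiH : ((i : Nat) : Int) ≤ h := by
            have hhW : h.toNat < mWidth matrix := (hmemL h hhjs).2
            by_contra hlt
            push_neg at hlt
            have h0h : 0 ≤ h := (hmemL h hhjs).1
            have hhi : h.toNat < i := by omega
            have hlen : h.toNat < counts.length := lt_trans hhi hk
            have hcv : counts[h.toNat]'hlen = colCnt matrix number h.toNat := by
              simp [hcounts]
            exact hmin h.toNat hhi (hcv.trans hch)
          -- sortedness of the filtered list gives h ≤ i
          have hpf : (h :: t).Pairwise (fun a b : Int => a ≤ b) := by
            rw [← hf]
            exact hpw.sublist List.filter_sublist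
          have hHi : h ≤ ((i : Nat) : Int) := by
            rcases List.mem_cons.mp hif with h1 | h1
            · omega
            · exact List.rel_of_pairwise_cons hpf h1
          have hhi2 : h = ((i : Nat) : Int) := le_antisymm hHi hiH
          have hieq' : List.idxOf? m counts = some i := by simpa using hieq
          simp [hieq', hm, hhi2]
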